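-- pv_equiv track=rewrite | github.com/ScottyKuze/Macierze-cwiczenia | main.py | jednostkowa
-- ===== SOURCE A (Python) =====
-- def kwadratowa(macierz):
--     liczba_wierszy = len(macierz)
--     for i in range(0, len(macierz)):
--         liczba_kolumn = len(macierz[i])
--         if liczba_kolumn == liczba_wierszy:
--             continue
--         else:
--             return False
--     return True
--
-- def jednostkowa(macierz):
--     if not kwadratowa(macierz):
--         return False
--         # macierz niekwadratowa nie może być jednostkowa
--     for i in range(0, len(macierz)):
--         for j in range(0, len(macierz[i])):
--             # przypadek gdy indeksy są te same (powinno być == 1)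
--             if i == j:
--                 if macierz[i][j] == 1:
--                     continue
--                 else:
--                     return False
--             else:
--                 if macierz[i][j] == 0:
--                     continue
--                 else:
--                     return False
--     return True
-- ===== SOURCE B (Python) =====
-- def jednostkowa(macierz):
--     n = len(macierz)
--     if any(len(w) != n for w in macierz):
--         return False
--     expected = [[1 if i == j else 0 for j in range(n)] for i in range(n)]
--     return macierz == expected
-- ===== Notes on version B (the rewrite author's own statement) =====
-- stated objective: simpler
-- what changed: Replaces the per-element nested loops with early returns by building the reference identity matrix and doing one whole-matrix comparison (square check folded into one any()).
import Mathlib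
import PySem

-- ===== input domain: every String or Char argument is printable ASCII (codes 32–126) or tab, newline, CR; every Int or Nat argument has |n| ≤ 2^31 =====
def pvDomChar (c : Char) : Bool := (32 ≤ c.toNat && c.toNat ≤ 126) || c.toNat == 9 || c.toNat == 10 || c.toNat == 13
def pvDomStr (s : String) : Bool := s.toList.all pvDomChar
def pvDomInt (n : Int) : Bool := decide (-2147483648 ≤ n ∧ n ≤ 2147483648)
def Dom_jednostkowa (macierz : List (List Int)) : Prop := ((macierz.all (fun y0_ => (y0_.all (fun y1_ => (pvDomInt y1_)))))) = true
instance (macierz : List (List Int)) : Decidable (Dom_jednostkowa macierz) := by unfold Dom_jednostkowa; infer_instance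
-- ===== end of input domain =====

-- B replaces A's per-element nested loops with building the reference identity matrix and one whole-matrix comparison (objective: simpler).


-- ===== PORT A =====
-- kwadratowa: loop over the rows, early return False on a row whose length ≠ number of rows
def kwadratowaGo (n : Nat) (rows : List (List Int)) : Bool :=
  match rows with
  | [] => true
  | r :: rest => if r.length = n then kwadratowaGo n rest else false

def kwadratowa (macierz : List (List Int)) : Bool :=
  kwadratowaGo macierz.length macierz

-- inner loop over row i: index j runs along the row, early returns kept branch-for-branch
def jedRow (i : Nat) (j : Nat) (row : List Int) : Bool :=
  match row with
  | [] => true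
  | x :: rest =>
    if i = j then
      if x = 1 then jedRow i (j + 1) rest else false
    else
      if x = 0 then jedRow i (j + 1) rest else false

-- outer loop over the rows, i is the row index
def jedRows (i : Nat) (rows : List (List Int)) : Bool :=
  match rows with
  | [] => true
  | r :: rest => if jedRow i 0 r then jedRows (i + 1) rest else false

def jednostkowa (macierz : List (List Int)) : Bool :=
  if !kwadratowa macierz then false
  else jedRows 0 macierz

-- ===== PORT B =====
def jednostkowa_alt (macierz : List (List Int)) : Bool :=
  let n := macierz.length
  if macierz.any (fun w => w.length ≠ n) then false
  else
    let expected := (List.range n).map (fun i => (List.range n).map (fun j => if i = j then (1 : Int) else 0))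
    macierz = expected

-- ===== PRECONDITION & SPEC =====
def Spec_jednostkowa (macierz : List (List Int)) (out : Bool) : Prop := out = jednostkowa_alt macierz
instance (macierz : List (List Int)) (out : Bool) : Decidable (Spec_jednostkowa macierz out) := by unfold Spec_jednostkowa; infer_instance

-- ===== CLAIM (what is proved, stated in full; the proofs are below) =====
def Claim_equal_jednostkowa : Prop := ∀ (macierz : List (List Int)), Dom_jednostkowa macierz → Spec_jednostkowa macierz (jednostkowa macierz)

-- ===== LEMMAS AND PROOFS =====

theorem kwadratowaGo_eq_all (n : Nat) (rows : List (List Int)) :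
    kwadratowaGo n rows = rows.all (fun r => r.length = n) := by
  induction rows with
  | nil => rfl
  | cons r rest ih =>
    by_cases h : r.length = n <;> simp [kwadratowaGo, ih, h]

theorem jedRow_eq (i j : Nat) (row : List Int) :
    jedRow i j row =
      decide (row = (List.range' j row.length).map (fun k => if i = k then (1 : Int) else 0)) := by
  induction row generalizing j with
  | nil => simp [jedRow]
  | cons x rest ih =>
    simp only [jedRow, List.length_cons, List.range'_succ, List.map_cons, ih]
    by_cases hij : i = j
    · by_cases hx : x = 1 <;> simp [hij, hx]
    · by_cases hx : x = 0 <;> simp [hij, hx]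

theorem jedRows_eq (i : Nat) (n : Nat) (rows : List (List Int))
    (h : ∀ r ∈ rows, r.length = n) :
    jedRows i rows =
      decide (rows = (List.range' i rows.length).map
        (fun k => (List.range n).map (fun j => if k = j then (1 : Int) else 0))) := by
  induction rows generalizing i with
  | nil => simp [jedRows]
  | cons r rest ih =>
    have hr : r.length = n := h r (by simp)
    simp only [jedRows, List.length_cons, List.range'_succ, List.map_cons,
      ih (i+1) (fun s hs => h s (by simp [hs])), jedRow_eq, hr]
    have : (List.range' 0 n) = List.range n := by simp [List.range_eq_range']
    rw [this]
    by_cases h1 : r = (List.range n).map (fun j => if i = j then (1:Int) else 0) <;>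
      simp [h1]

-- ===== VERDICT (by name: the statement is the Claim_ definition above) =====
theorem jednostkowa_spec : Claim_equal_jednostkowa := by
  intro macierz _
  unfold Spec_jednostkowa jednostkowa jednostkowa_alt kwadratowa
  rw [kwadratowaGo_eq_all]
  by_cases hsq : ∀ r ∈ macierz, r.length = macierz.length
  · have hall : macierz.all (fun r => r.length = macierz.length) = true := by
      simp only [List.all_eq_true, decide_eq_true_eq]; exact fun r hr => hsq r hr
    have hany : macierz.any (fun w => w.length ≠ macierz.length) = false := by
      simp only [List.any_eq_false]; intro w hw; simp [hsq w hw]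
    simp only [hall, hany, Bool.not_true, Bool.false_eq_true, if_false]
    rw [jedRows_eq 0 macierz.length macierz hsq]
    congr 1
    simp [List.range_eq_range']
  · have hall : macierz.all (fun r => r.length = macierz.length) = false := by
      simp only [List.all_eq_false]
      push Not at hsq; obtain ⟨r, hr, hne⟩ := hsq
      exact ⟨r, hr, by simp [hne]⟩
    have hany : macierz.any (fun w => w.length ≠ macierz.length) = true := by
      simp only [List.any_eq_true]
      push Not at hsq; obtain ⟨r, hr, hne⟩ := hsq
      exact ⟨r, hr, by simp [hne]⟩
    simp [hall]
    exact fun h => absurd h hsq
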